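-- pv_equiv track=rewrite | github.com/khuushichand/aiml-project | tldw_Server_API/app/core/Chunking/strategies/code.py | _find_block_for_header_braces
-- ===== SOURCE A (Python) =====
-- def _find_block_for_header_braces(lines: list[str], header_idx: int) -> int:
--     # For brace languages: find first '{' after header, then match braces
--     i = header_idx
--     # find start brace
--     brace_count = 0
--     found = False
--     while i < len(lines):
--         line = lines[i]
--         if '{' in line:
--             brace_count = line.count('{') - line.count('}')
--             found = True
--             if brace_count <= 0:
--                 return i + 1
--             i += 1
--             break
--         # In some languages, the brace may be on the next line after signature
--         i += 1
--     if not found: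
--         # Fallback: single-line or no brace; use until next header or blank line
--         j = header_idx + 1
--         while j < len(lines) and lines[j].strip():
--             j += 1
--         return j
--     # Now find when brace_count returns to zero from this point
--     while i < len(lines):
--         brace_count += lines[i].count('{') - lines[i].count('}')
--         if brace_count <= 0:
--             return i + 1
--         i += 1
--     return len(lines)
-- ===== SOURCE B (Python) =====
-- def _find_block_for_header_braces(lines: list[str], header_idx: int) -> int:
--     # Staged: find the first brace line declaratively, then materialize per-line
--     # brace diffs and their prefix sums and pick the first non-positive one.
--     n = len(lines)
--     offs = range(header_idx, n)
--     start = next((k for k, i in enumerate(offs) if '{' in lines[i]), None)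
--     if start is None:
--         # no brace at all: fall back to the blank-line scan
--         j = header_idx + 1
--         while j < n and lines[j].strip():
--             j += 1
--         return j
--     diffs = [lines[i].count('{') - lines[i].count('}') for i in offs]
--     sums = [0]
--     for d in diffs[start:]:
--         sums.append(sums[-1] + d)
--     end = next((k for k, s in enumerate(sums[1:]) if s <= 0), None)
--     return n if end is None else header_idx + start + end + 1
-- ===== Notes on version B (the rewrite author's own statement) =====
-- stated objective: alternative
-- what changed: Replaced A's streaming while-loops with a running mutable counter and early returns by staged passes: a declarative next() search for the first brace line, a materialized list of per-line brace diffs, an explicit prefix-sum list, and a second next() search for the first non-positive prefix sum.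
import Mathlib
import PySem

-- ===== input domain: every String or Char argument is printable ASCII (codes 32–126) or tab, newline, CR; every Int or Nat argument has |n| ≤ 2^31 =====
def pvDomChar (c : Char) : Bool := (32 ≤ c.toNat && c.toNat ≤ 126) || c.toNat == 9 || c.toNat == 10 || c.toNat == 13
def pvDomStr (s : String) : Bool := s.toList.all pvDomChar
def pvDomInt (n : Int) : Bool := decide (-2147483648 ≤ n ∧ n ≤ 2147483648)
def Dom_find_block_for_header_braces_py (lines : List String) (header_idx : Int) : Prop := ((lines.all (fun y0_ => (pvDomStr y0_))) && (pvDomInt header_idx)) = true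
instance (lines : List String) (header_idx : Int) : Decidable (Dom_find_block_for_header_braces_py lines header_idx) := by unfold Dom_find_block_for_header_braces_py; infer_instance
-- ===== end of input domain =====

-- B replaces A's streaming while-loops (mutable counter, early returns) by staged passes:
-- a declarative search for the first brace line, a materialized per-line diff list, an
-- explicit prefix-sum list, and a search for its first non-positive entry (objective: alternative).


-- ===== PORT A =====
-- line.count('{') - line.count('}')
def pvBraceDiff (s : String) : Int :=
  (PySem.Str.count s "{" : Int) - (PySem.Str.count s "}" : Int)

-- lines[i] (Python indexing; the "" default is unreachable under Pre_)
def pvLine (lines : List String) (i : Int) : String :=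
  (PySem.List.pyGet? lines i).getD ""

-- A's first while-loop: .inl r = "return r", .inr (some (i, bc)) = "break" with the new i and
-- brace_count, .inr none = loop exhausted with found still False
def pvA_find (lines : List String) : Nat → Int → Sum Int (Option (Int × Int))
  | 0, _ => .inr none
  | fuel+1, i =>
    if i < (lines.length : Int) then
      let line := pvLine lines i
      if PySem.Str.isIn "{" line then
        let bc := pvBraceDiff line
        if bc ≤ 0 then .inl (i + 1) else .inr (some (i + 1, bc))
      else pvA_find lines fuel (i + 1)
    else .inr none

-- A's second while-loop (brace balancing after the break)
def pvA_balance (lines : List String) : Nat → Int → Int → Int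
  | 0, _, _ => (lines.length : Int)
  | fuel+1, i, bc =>
    if i < (lines.length : Int) then
      let bc' := bc + pvBraceDiff (pvLine lines i)
      if bc' ≤ 0 then i + 1 else pvA_balance lines fuel (i + 1) bc'
    else (lines.length : Int)

-- A's fallback while-loop (advance j while lines[j].strip() is truthy)
def pvA_fallback (lines : List String) : Nat → Int → Int
  | 0, j => j
  | fuel+1, j =>
    if j < (lines.length : Int) ∧ PySem.Chars.strip (pvLine lines j).toList ≠ [] then
      pvA_fallback lines fuel (j + 1)
    else j

def find_block_for_header_braces_py (lines : List String) (header_idx : Int) : Int :=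
  match pvA_find lines ((lines.length : Int) - header_idx).toNat header_idx with
  | .inl r => r
  | .inr none =>
      pvA_fallback lines ((lines.length : Int) - (header_idx + 1)).toNat (header_idx + 1)
  | .inr (some p) => pvA_balance lines ((lines.length : Int) - p.1).toNat p.1 p.2

-- ===== PORT B =====
-- B's blank-line fallback while-loop (only reached when no brace line exists)
def pvB_fallback (lines : List String) : Nat → Int → Int
  | 0, j => j
  | fuel+1, j =>
    if j < (lines.length : Int) ∧ PySem.Chars.strip (pvLine lines j).toList ≠ [] then
      pvB_fallback lines fuel (j + 1)
    else j

def find_block_for_header_braces_py_alt (lines : List String) (header_idx : Int) : Int :=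
  let n : Int := (lines.length : Int)
  let offs := PySem.List.pyRange header_idx n 1
  -- start = next((k for k, i in enumerate(offs) if '{' in lines[i]), None)
  match (PySem.List.enumerate offs).find? (fun p => PySem.Str.isIn "{" (pvLine lines p.2)) with
  | none => pvB_fallback lines (n - (header_idx + 1)).toNat (header_idx + 1)
  | some (start, _) =>
    -- diffs = [lines[i].count('{') - lines[i].count('}') for i in offs]
    let diffs := offs.map (fun i => pvBraceDiff (pvLine lines i))
    -- sums = [0]; for d in diffs[start:]: sums.append(sums[-1] + d)
    let sums := (PySem.List.slice diffs (some start) none).foldl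
        (fun acc d => acc ++ [PySem.List.pyGetD acc (-1) 0 + d]) [0]
    -- end = next((k for k, s in enumerate(sums[1:]) if s <= 0), None)
    match (PySem.List.enumerate (PySem.List.slice sums (some 1) none)).find?
        (fun p => decide (p.2 ≤ 0)) with
    | none => n
    | some (k, _) => header_idx + start + k + 1

-- ===== PRECONDITION & SPEC =====
-- Pre_ excludes exactly the inputs on which A raises IndexError: header_idx < -len(lines), where
-- the loop indexes out of range (B raises identically there; nothing A returns on is excluded).
def Pre_find_block_for_header_braces_py (lines : List String) (header_idx : Int) : Prop :=
  -(lines.length : Int) ≤ header_idx ∨ (lines.length : Int) ≤ header_idx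
instance (lines : List String) (header_idx : Int) : Decidable (Pre_find_block_for_header_braces_py lines header_idx) := by unfold Pre_find_block_for_header_braces_py; infer_instance

def pvWitness_find_block_for_header_braces_py : List String × Int := (["int f() {", "  x += 1;", "}"], 0)

def Spec_find_block_for_header_braces_py (lines : List String) (header_idx : Int) (out : Int) : Prop := out = find_block_for_header_braces_py_alt lines header_idx
instance (lines : List String) (header_idx : Int) (out : Int) : Decidable (Spec_find_block_for_header_braces_py lines header_idx out) := by unfold Spec_find_block_for_header_braces_py; infer_instance

-- ===== CLAIM (what is proved, stated in full; the proofs are below) =====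
def Claim_equal_find_block_for_header_braces_py : Prop := ∀ (lines : List String) (header_idx : Int), Dom_find_block_for_header_braces_py lines header_idx → Pre_find_block_for_header_braces_py lines header_idx → Spec_find_block_for_header_braces_py lines header_idx (find_block_for_header_braces_py lines header_idx)

-- ===== LEMMAS AND PROOFS =====

-- prefix sums of a diff list, starting from a running total acc
def pvScan (acc : Int) : List Int → List Int
  | [] => []
  | d :: t => (acc + d) :: pvScan (acc + d) t

-- index of the first non-positive prefix sum, starting from a running total acc
def pvFirst (acc : Int) : List Int → Option Int
  | [] => none
  | d :: t => if acc + d ≤ 0 then some 0 else (pvFirst (acc + d) t).map (· + 1)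

-- B's sums-building fold produces 0 :: pvScan 0 ds
lemma pv_sums_eq (ds : List Int) : ∀ (pre : List Int) (a : Int),
    ds.foldl (fun acc d => acc ++ [PySem.List.pyGetD acc (-1) 0 + d]) (pre ++ [a]) =
      (pre ++ [a]) ++ pvScan a ds := by
  induction ds with
  | nil => intro pre a; simp [pvScan]
  | cons d t ih =>
      intro pre a
      simp only [List.foldl_cons, PySem.List.pyGetD_neg_one_append_singleton]
      have h := ih (pre ++ [a]) (a + d)
      simpa [pvScan, List.append_assoc] using h

-- B's inner search over the enumerated prefix sums is pvFirst
lemma pv_find_scan (ds : List Int) : ∀ (acc s : Int),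
    ((PySem.List.enumerate (pvScan acc ds) s).find? (fun p => decide (p.2 ≤ 0))).map Prod.fst =
      (pvFirst acc ds).map (fun k => s + k) := by
  induction ds with
  | nil => intro acc s; simp [pvScan, pvFirst, PySem.List.enumerate_nil]
  | cons d t ih =>
      intro acc s
      simp only [pvScan, pvFirst, PySem.List.enumerate_cons]
      by_cases h : acc + d ≤ 0
      · rw [List.find?_cons_of_pos (by simp [h])]
        simp [h]
      · rw [List.find?_cons_of_neg (by simp [h])]
        rw [ih (acc + d) (s + 1)]
        simp only [h, if_false]
        cases pvFirst (acc + d) t with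
        | none => simp
        | some m => simp only [Option.map_some]; congr 1; omega

-- A's balancing loop returns the first index whose running total is non-positive
lemma pv_bal_eq (lines : List String) : ∀ (fuel : Nat) (i bc : Int),
    fuel = ((lines.length : Int) - i).toNat →
    pvA_balance lines fuel i bc =
      (match pvFirst bc ((PySem.List.pyRange i (lines.length : Int) 1).map
          (fun j => pvBraceDiff (pvLine lines j))) with
       | none => (lines.length : Int)
       | some k => i + k + 1) := by
  intro fuel
  induction fuel with
  | zero =>
      intro i bc hf
      have hni : (lines.length : Int) ≤ i := by omega
      rw [PySem.List.pyRange_one_eq_nil hni]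
      simp [pvA_balance, pvFirst]
  | succ m ih =>
      intro i bc hf
      have hi : i < (lines.length : Int) := by omega
      rw [PySem.List.pyRange_one_cons hi]
      simp only [pvA_balance, hi, if_pos, List.map_cons, pvFirst]
      by_cases hb : bc + pvBraceDiff (pvLine lines i) ≤ 0
      · simp [hb]
      · simp only [hb, if_false]
        rw [ih (i + 1) _ (by omega)]
        cases pvFirst (bc + pvBraceDiff (pvLine lines i))
            ((PySem.List.pyRange (i + 1) (lines.length : Int) 1).map
              (fun j => pvBraceDiff (pvLine lines j))) with
        | none => simp
        | some k => simp; omega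

-- A's first loop is a find? over the index range
lemma pv_findA_eq (lines : List String) : ∀ (fuel : Nat) (i : Int),
    fuel = ((lines.length : Int) - i).toNat →
    pvA_find lines fuel i =
      (match (PySem.List.pyRange i (lines.length : Int) 1).find?
          (fun j => PySem.Str.isIn "{" (pvLine lines j)) with
       | none => .inr none
       | some j => if pvBraceDiff (pvLine lines j) ≤ 0 then .inl (j + 1)
                   else .inr (some (j + 1, pvBraceDiff (pvLine lines j)))) := by
  intro fuel
  induction fuel with
  | zero =>
      intro i hf
      have hni : (lines.length : Int) ≤ i := by omega
      rw [PySem.List.pyRange_one_eq_nil hni]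
      simp [pvA_find]
  | succ m ih =>
      intro i hf
      have hi : i < (lines.length : Int) := by omega
      rw [PySem.List.pyRange_one_cons hi]
      simp only [pvA_find, hi, if_pos]
      by_cases hbr : PySem.Str.isIn "{" (pvLine lines i) = true
      · rw [List.find?_cons_of_pos (by simpa using hbr)]
        rw [if_pos hbr]
      · rw [List.find?_cons_of_neg (by simpa using hbr)]
        simp only [Bool.not_eq_true] at hbr
        simp only [hbr, Bool.false_eq_true, if_false]
        exact ih (i + 1) (by omega)

-- B's enumerated search over an index range is a find? over the range plus an offset
lemma pv_enumfind (lines : List String) : ∀ (m : Nat) (a s : Int),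
    m = ((lines.length : Int) - a).toNat →
    (PySem.List.enumerate (PySem.List.pyRange a (lines.length : Int) 1) s).find?
        (fun p => PySem.Str.isIn "{" (pvLine lines p.2)) =
      ((PySem.List.pyRange a (lines.length : Int) 1).find?
          (fun j => PySem.Str.isIn "{" (pvLine lines j))).map (fun j => (s + (j - a), j)) := by
  intro m
  induction m with
  | zero =>
      intro a s hf
      rw [PySem.List.pyRange_one_eq_nil (by omega)]
      simp [PySem.List.enumerate_nil]
  | succ m ih =>
      intro a s hf
      have ha : a < (lines.length : Int) := by omega
      rw [PySem.List.pyRange_one_cons ha]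
      rw [PySem.List.enumerate_cons]
      by_cases hbr : PySem.Str.isIn "{" (pvLine lines a) = true
      · rw [List.find?_cons_of_pos (by simpa using hbr),
            List.find?_cons_of_pos (by simpa using hbr)]
        simp
      · rw [List.find?_cons_of_neg (by simpa using hbr),
            List.find?_cons_of_neg (by simpa using hbr)]
        rw [ih (a + 1) (s + 1) (by omega)]
        cases (PySem.List.pyRange (a + 1) (lines.length : Int) 1).find?
            (fun j => PySem.Str.isIn "{" (pvLine lines j)) with
        | none => simp
        | some j => simp; omega

-- dropping k entries of an index range advances its start
lemma pv_range_drop : ∀ (k : Nat) (a b : Int),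
    (PySem.List.pyRange a b 1).drop k = PySem.List.pyRange (a + (k : Int)) b 1 := by
  intro k
  induction k with
  | zero => intro a b; simp
  | succ m ih =>
      intro a b
      by_cases hab : a < b
      · rw [PySem.List.pyRange_one_cons hab]
        rw [List.drop_succ_cons, ih (a + 1) b]
        congr 1; omega
      · rw [PySem.List.pyRange_one_eq_nil (by omega),
            PySem.List.pyRange_one_eq_nil (by omega)]
        simp
  -- the two fallback loops are the same loop
lemma pv_fallback_eq (lines : List String) : ∀ (fuel : Nat) (j : Int),
    pvA_fallback lines fuel j = pvB_fallback lines fuel j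
  | 0, _ => rfl
  | fuel+1, j => by
      simp only [pvA_fallback, pvB_fallback]
      split_ifs
      · exact pv_fallback_eq lines fuel (j + 1)
      · rfl

-- ===== VERDICT (by name: the statement is the Claim_ definition above) =====
theorem find_block_for_header_braces_py_spec : Claim_equal_find_block_for_header_braces_py := by
  intro lines header_idx _dom _pre
  unfold Spec_find_block_for_header_braces_py
  unfold find_block_for_header_braces_py find_block_for_header_braces_py_alt
  simp only []
  rw [pv_findA_eq lines _ header_idx rfl,
      pv_enumfind lines ((lines.length : Int) - header_idx).toNat header_idx 0 rfl]
  cases hf : (PySem.List.pyRange header_idx (lines.length : Int) 1).find?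
      (fun j => PySem.Str.isIn "{" (pvLine lines j)) with
  | none => simpa using pv_fallback_eq lines _ _
  | some j =>
      have hj : header_idx ≤ j ∧ j < (lines.length : Int) := by
        have := List.mem_of_find?_eq_some hf
        exact (PySem.List.mem_pyRange_one).1 this
      -- reduce B's scrutinee and lets
      simp only [Option.map_some, zero_add]
      -- diffs[start:] = diffs of the range from j
      have hslice : PySem.List.slice
          ((PySem.List.pyRange header_idx (lines.length : Int) 1).map
            (fun i => pvBraceDiff (pvLine lines i))) (some (j - header_idx)) none =
          (PySem.List.pyRange j (lines.length : Int) 1).map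
            (fun i => pvBraceDiff (pvLine lines i)) := by
        rw [PySem.List.slice_from _ (by omega), ← List.map_drop,
            pv_range_drop (j - header_idx).toNat header_idx (lines.length : Int)]
        congr 2; omega
      rw [hslice]
      have hcons : PySem.List.pyRange j (lines.length : Int) 1 =
          j :: PySem.List.pyRange (j + 1) (lines.length : Int) 1 :=
        PySem.List.pyRange_one_cons hj.2
      rw [hcons]
      simp only [List.map_cons]
      set d0 := pvBraceDiff (pvLine lines j) with hd0
      set tl := (PySem.List.pyRange (j + 1) (lines.length : Int) 1).map
          (fun i => pvBraceDiff (pvLine lines i)) with htl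
      -- sums = [0] ++ pvScan 0 (d0 :: tl)
      have hsums : (d0 :: tl).foldl (fun acc d => acc ++ [PySem.List.pyGetD acc (-1) 0 + d])
          [0] = [0] ++ pvScan 0 (d0 :: tl) := by
        have := pv_sums_eq (d0 :: tl) [] 0
        simpa using this
      rw [hsums]
      have hs1 : PySem.List.slice ([0] ++ pvScan 0 (d0 :: tl)) (some 1) none =
          pvScan 0 (d0 :: tl) := by
        rw [PySem.List.slice_from _ (by omega)]
        simp
      rw [hs1]
      have hfind : ((PySem.List.enumerate (pvScan 0 (d0 :: tl)) 0).find?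
          (fun p => decide (p.2 ≤ 0))).map Prod.fst = pvFirst 0 (d0 :: tl) := by
        simpa using pv_find_scan (d0 :: tl) 0 0
      by_cases hb : d0 ≤ 0
      · -- first prefix sum already non-positive: A returns j + 1
        rw [if_pos hb]
        rw [show pvFirst 0 (d0 :: tl) = some 0 by simp [pvFirst, hb]] at hfind
        cases hE : (PySem.List.enumerate (pvScan 0 (d0 :: tl)) 0).find?
            (fun p => decide (p.2 ≤ 0)) with
        | none => rw [hE] at hfind; simp at hfind
        | some q =>
            rw [hE] at hfind
            obtain ⟨k, v⟩ := q
            simp only [Option.map_some, Option.some.injEq] at hfind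
            simp only [hfind]
            omega
      · -- A continues with the balancing loop
        rw [if_neg hb]
        rw [show pvFirst 0 (d0 :: tl) = (pvFirst d0 tl).map (· + 1) by
              simp [pvFirst, hb]] at hfind
        show pvA_balance lines ((lines.length : Int) - (j + 1)).toNat (j + 1) d0 = _
        rw [pv_bal_eq lines _ (j + 1) d0 rfl, ← htl]
        cases hP : pvFirst d0 tl with
        | none =>
            rw [hP] at hfind
            simp only [Option.map_none, Option.map_eq_none_iff] at hfind
            rw [hfind]
        | some m =>
            rw [hP] at hfind
            cases hE : (PySem.List.enumerate (pvScan 0 (d0 :: tl)) 0).find?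
                (fun p => decide (p.2 ≤ 0)) with
            | none => rw [hE] at hfind; simp at hfind
            | some q =>
                rw [hE] at hfind
                obtain ⟨k, v⟩ := q
                simp only [Option.map_some, Option.some.injEq] at hfind
                show j + 1 + m + 1 = header_idx + (j - header_idx) + k + 1
                omega
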